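-- pv_equiv track=rewrite | github.com/gph03n1x/scarletmoon | moon/queries/querying.py | sort_query
-- ===== SOURCE A (Python) =====
-- import heapq
--
-- priorities = {
--     "<and>": 2,
--     "<or>": 1,
--     "<not>": 2
-- }
--
-- def sort_query(query, default_op="<or>"):
--     """
--     sorts a query based on the boolean priorities.
--     :param: testing <or> not something <not> hype <or> random <not> python
--     :return: ['something', '<and>', 'testing', '<or>', 'not', '<or>', 'random', '<not>', 'hype', '<not>', 'python']
--     """
--     selected_priority = priorities[default_op]
--     selected_operation = default_op
--     heap = []
--     for query_part in query:
--         if query_part in priorities.keys():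
--             selected_priority = priorities[query_part]
--             selected_operation = query_part
--         else:
--             heapq.heappush(heap, (selected_priority, selected_operation + " " + query_part))
--             selected_priority = priorities[default_op]
--             selected_operation = default_op
--
--     return " ".join([heapq.heappop(heap)[1] for _ in range(len(heap))]).split(" ", 1)[1].split()
-- ===== SOURCE B (Python) =====
-- priorities = {
--     "<and>": 2,
--     "<or>": 1,
--     "<not>": 2
-- }
--
-- def sort_query(query, default_op="<or>"):
--     # plain list + one sort instead of a heap; tokens assembled piecewise instead of
--     # joining everything into one big string and re-splitting it
--     pairs = []
--     op = default_op
--     for part in query: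
--         if part in priorities:
--             op = part
--         else:
--             pairs.append((priorities[op], op + " " + part))
--             op = default_op
--     pairs.sort()
--     out = pairs[0][1].split(" ", 1)[1].split()
--     for _, s in pairs[1:]:
--         out.extend(s.split())
--     return out
-- ===== Notes on version B (the rewrite author's own statement) =====
-- stated objective: alternative
-- what changed: B collects (priority, 'op part') tuples in a plain list and sorts it once instead of maintaining a heap, and assembles the result tokens piecewise (split each sorted entry, dropping the first entry's operator) instead of joining everything into one big string and re-splitting it.
import Mathlib
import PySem

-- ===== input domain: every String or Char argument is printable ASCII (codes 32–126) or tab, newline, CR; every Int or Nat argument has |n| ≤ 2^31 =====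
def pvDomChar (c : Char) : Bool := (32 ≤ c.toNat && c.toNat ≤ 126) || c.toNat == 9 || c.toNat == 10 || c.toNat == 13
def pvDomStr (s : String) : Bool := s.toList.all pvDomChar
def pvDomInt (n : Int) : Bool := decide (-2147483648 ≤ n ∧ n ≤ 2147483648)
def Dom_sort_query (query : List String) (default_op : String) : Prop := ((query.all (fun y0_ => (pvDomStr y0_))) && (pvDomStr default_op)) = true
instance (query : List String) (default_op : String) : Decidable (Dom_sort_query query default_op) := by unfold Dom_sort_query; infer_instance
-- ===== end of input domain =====

-- B replaces the heap with one list sort and assembles the result tokens piecewise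
-- instead of joining everything into one string and re-splitting it (objective: alternative).

-- ===== PORT A =====
-- module-level dict `priorities`
def pvPriorities : PySem.Dict String Int :=
  ((PySem.Dict.empty.insert "<and>" 2).insert "<or>" 1).insert "<not>" 2

-- Python's tuple '<' on (int, str); the string comparison is stated on .toList
-- (code-point lexicographic, exactly Python's string order, and kernel-reducible)
def pvLt (a b : Int × String) : Bool :=
  decide (a.1 < b.1) || (!decide (b.1 < a.1) && decide (a.2.toList < b.2.toList))

-- heapq modeled by its priority-queue contract: the heap is kept as an ordered list,
-- heappop returns the head, so the sequence of pops is exactly heapq's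
def pvHeappush (heap : List (Int × String)) (x : Int × String) : List (Int × String) :=
  PySem.List.insertBy pvLt x heap

-- priorities[default_op]: KeyError when absent (excluded by Pre_), ported with getD 0;
-- "[heappop(heap)[1] for _ in range(len(heap))]": successive minima = the ordered list;
-- ".split(" ", 1)[1]": [1] is an IndexError when the heap was empty (excluded by Pre_), ported with getD
def sort_query (query : List String) (default_op : String) : List String :=
  PySem.Str.split₀
    ((PySem.List.pyGet?
      ((PySem.Str.splitMax?
        (PySem.Str.join " "
          ((query.foldl
            (fun (s : Int × String × List (Int × String)) query_part =>
              if pvPriorities.contains query_part then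
                ((pvPriorities.get? query_part).getD 0, query_part, s.2.2)
              else
                ((pvPriorities.get? default_op).getD 0, default_op,
                 pvHeappush s.2.2 (s.1, s.2.1 ++ " " ++ query_part)))
            ((pvPriorities.get? default_op).getD 0, default_op, ([] : List (Int × String)))).2.2.map (·.2)))
        " " 1).getD []) 1).getD "")

-- ===== PORT B =====
def sort_query_alt (query : List String) (default_op : String) : List String :=
  match PySem.List.sorted2
      (query.foldl
        (fun (s : String × List (Int × String)) part =>
          if pvPriorities.contains part then (part, s.2)
          else (default_op, s.2 ++ [((pvPriorities.get? s.1).getD 0, s.1 ++ " " ++ part)]))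
        (default_op, ([] : List (Int × String)))).2 (·.1) (·.2.toList) with
  | [] => []  -- pairs[0] is an IndexError in Python here (excluded by Pre_)
  | p0 :: rest =>
    rest.foldl (fun out p => out ++ PySem.Str.split₀ p.2)
      (PySem.Str.split₀
        ((PySem.List.pyGet? ((PySem.Str.splitMax? p0.2 " " 1).getD []) 1).getD ""))

-- ===== PRECONDITION & SPEC =====
-- A raises KeyError when default_op is not one of the three operators, and IndexError
-- when the query contains no non-operator token (empty heap); exactly those are excluded.
def Pre_sort_query (query : List String) (default_op : String) : Prop :=
  (default_op = "<and>" ∨ default_op = "<or>" ∨ default_op = "<not>") ∧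
  ∃ part ∈ query, part ≠ "<and>" ∧ part ≠ "<or>" ∧ part ≠ "<not>"
instance (query : List String) (default_op : String) : Decidable (Pre_sort_query query default_op) := by
  unfold Pre_sort_query; infer_instance

def pvWitness_sort_query : List String × String := (["testing", "<or>", "hype"], "<or>")

def Spec_sort_query (query : List String) (default_op : String) (out : List String) : Prop := out = sort_query_alt query default_op
instance (query : List String) (default_op : String) (out : List String) : Decidable (Spec_sort_query query default_op out) := by unfold Spec_sort_query; infer_instance

-- ===== CLAIM (what is proved, stated in full; the proofs are below) =====
def Claim_equal_sort_query : Prop := ∀ (query : List String) (default_op : String), Dom_sort_query query default_op → Pre_sort_query query default_op → Spec_sort_query query default_op (sort_query query default_op)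

-- ===== LEMMAS AND PROOFS =====

def pvOps : List String := ["<and>", "<or>", "<not>"]

-- the sequence of (priority, "op part") pairs the loop pushes, as a plain function
def pvPairs (dop : String) : List String → String → List (Int × String)
  | [], _ => []
  | x :: q, op =>
    if pvPriorities.contains x then pvPairs dop q x
    else ((pvPriorities.get? op).getD 0, op ++ " " ++ x) :: pvPairs dop q dop

lemma pv_contains_iff (x : String) :
    pvPriorities.contains x = true ↔ x ∈ pvOps := by
  constructor
  · intro h
    by_contra hx
    simp only [pvOps, List.mem_cons, List.not_mem_nil, or_false, not_or] at hx
    obtain ⟨h1, h2, h3⟩ := hx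
    unfold pvPriorities at h
    rw [PySem.Dict.contains_insert, PySem.Dict.contains_insert, PySem.Dict.contains_insert] at h
    simp [h1, h2, h3, PySem.Dict.empty, PySem.Dict.contains] at h
  · intro hx
    rcases (by simpa [pvOps] using hx : x = "<and>" ∨ x = "<or>" ∨ x = "<not>") with rfl | rfl | rfl <;> decide

-- B's loop collects exactly pvPairs
lemma pv_loopB (dop : String) : ∀ (q : List String) (op : String) (acc : List (Int × String)),
    (q.foldl
      (fun (s : String × List (Int × String)) part =>
        if pvPriorities.contains part then (part, s.2)
        else (dop, s.2 ++ [((pvPriorities.get? s.1).getD 0, s.1 ++ " " ++ part)]))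
      (op, acc)).2 = acc ++ pvPairs dop q op := by
  intro q
  induction q with
  | nil => intro op acc; simp [pvPairs]
  | cons x q ih =>
    intro op acc
    by_cases h : pvPriorities.contains x = true
    · simp [List.foldl_cons, h, pvPairs, ih]
    · simp [List.foldl_cons, h, pvPairs, ih]

-- A's loop pushes exactly pvPairs into the heap
lemma pv_loopA (dop : String) : ∀ (q : List String) (op : String) (heap : List (Int × String)),
    (q.foldl
      (fun (s : Int × String × List (Int × String)) query_part =>
        if pvPriorities.contains query_part then
          ((pvPriorities.get? query_part).getD 0, query_part, s.2.2)
        else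
          ((pvPriorities.get? dop).getD 0, dop,
           pvHeappush s.2.2 (s.1, s.2.1 ++ " " ++ query_part)))
      ((pvPriorities.get? op).getD 0, op, heap)).2.2
    = (pvPairs dop q op).foldl pvHeappush heap := by
  intro q
  induction q with
  | nil => intro op heap; simp [pvPairs]
  | cons x q ih =>
    intro op heap
    by_cases h : pvPriorities.contains x = true
    · simp [List.foldl_cons, h, pvPairs, ih]
    · simp [List.foldl_cons, h, pvPairs, ih]

-- ordered insertion of everything = Python's sort of the collected list
lemma pv_heap_eq_sorted (xs : List (Int × String)) :
    xs.foldl pvHeappush [] = PySem.List.sorted2 xs (·.1) (·.2.toList) := by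
  rfl

lemma pv_pairs_shape (dop : String) (hdop : dop ∈ pvOps) :
    ∀ (q : List String) (op : String), op ∈ pvOps →
    ∀ p ∈ pvPairs dop q op, ∃ o t, o ∈ pvOps ∧ p.2 = o ++ " " ++ t := by
  intro q
  induction q with
  | nil => intro op _ p hp; simp [pvPairs] at hp
  | cons x q ih =>
    intro op hop p hp
    simp only [pvPairs] at hp
    by_cases h : pvPriorities.contains x = true
    · rw [if_pos h] at hp
      exact ih x ((pv_contains_iff x).mp h) p hp
    · rw [if_neg h] at hp
      rcases List.mem_cons.mp hp with rfl | hp'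
      · exact ⟨op, x, hop, rfl⟩
      · exact ih dop hdop p hp'

lemma pv_pairs_ne (dop : String) : ∀ (q : List String) (op : String),
    (∃ x ∈ q, ¬ pvPriorities.contains x = true) → pvPairs dop q op ≠ [] := by
  intro q
  induction q with
  | nil => intro op h; simp at h
  | cons y q ih =>
    intro op ⟨x, hx, hc⟩
    simp only [pvPairs]
    by_cases h : pvPriorities.contains y = true
    · rw [if_pos h]
      apply ih
      rcases List.mem_cons.mp hx with rfl | hx'
      · exact absurd h hc
      · exact ⟨x, hx', hc⟩
    · rw [if_neg h]; simp

-- split₀.go: the accumulator factors out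
lemma pv_go_acc (s : List Char) : ∀ (cur : List Char) (acc : List (List Char)),
    PySem.Chars.split₀.go s cur acc = acc.reverse ++ PySem.Chars.split₀.go s cur [] := by
  induction s with
  | nil =>
    intro cur acc
    by_cases h : cur.isEmpty = true <;> simp [PySem.Chars.split₀.go, h]
  | cons c rest ih =>
    intro cur acc
    by_cases hs : PySem.Chars.isspace c = true
    · by_cases h : cur.isEmpty = true
      · simp only [PySem.Chars.split₀.go, hs, h, if_true]
        exact ih [] acc
      · simp only [PySem.Chars.split₀.go, hs, h, if_true, if_false, Bool.false_eq_true]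
        rw [ih [] (cur.reverse :: acc), ih [] [cur.reverse]]
        simp
    · simp only [PySem.Chars.split₀.go, hs, Bool.false_eq_true, if_false]
      exact ih (c :: cur) acc

lemma pv_go_sep (x : List Char) : ∀ (y cur : List Char),
    PySem.Chars.split₀.go (x ++ ' ' :: y) cur []
      = PySem.Chars.split₀.go x cur [] ++ PySem.Chars.split₀.go y [] [] := by
  have hsp : PySem.Chars.isspace ' ' = true := by decide
  induction x with
  | nil =>
    intro y cur
    by_cases h : cur.isEmpty = true
    · simp [PySem.Chars.split₀.go, hsp, h]
    · rw [List.nil_append,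
        show PySem.Chars.split₀.go (' ' :: y) cur [] = PySem.Chars.split₀.go y [] [cur.reverse] from by
          simp [PySem.Chars.split₀.go, hsp, h],
        pv_go_acc y [] [cur.reverse]]
      simp [PySem.Chars.split₀.go, h]
  | cons c x' ih =>
    intro y cur
    by_cases hs : PySem.Chars.isspace c = true
    · by_cases h : cur.isEmpty = true
      · simp only [List.cons_append, PySem.Chars.split₀.go, hs, h, if_true]
        exact ih y []
      · simp only [List.cons_append, PySem.Chars.split₀.go, hs, h, if_true, if_false,
          Bool.false_eq_true]
        rw [pv_go_acc (x' ++ ' ' :: y) [] [cur.reverse], pv_go_acc x' [] [cur.reverse], ih y []]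
        simp
    · simp only [List.cons_append, PySem.Chars.split₀.go, hs, Bool.false_eq_true, if_false]
      exact ih y (c :: cur)

lemma pv_split₀_space (x y : List Char) :
    PySem.Chars.split₀ (x ++ ' ' :: y) = PySem.Chars.split₀ x ++ PySem.Chars.split₀ y := by
  simp [PySem.Chars.split₀, pv_go_sep]

lemma pv_split₀_flat (ys : List (List Char)) : ∀ (x : List Char),
    PySem.Chars.split₀ (x ++ ys.flatMap (fun r => ' ' :: r))
      = PySem.Chars.split₀ x ++ ys.flatMap PySem.Chars.split₀ := by
  induction ys with
  | nil => intro x; simp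
  | cons y ys ih =>
    intro x
    have hx : x ++ ((y :: ys).flatMap (fun r => ' ' :: r)) = x ++ ' ' :: (y ++ ys.flatMap (fun r => ' ' :: r)) := by
      simp
    rw [hx, pv_split₀_space, ih y]
    simp

lemma pv_goMax_m0 (fuel : Nat) (l cur : List Char) (acc : List (List Char)) :
    PySem.Chars.splitOnMax.go [' '] fuel 0 l cur acc = acc.reverse ++ [cur.reverse ++ l] := by
  cases fuel <;> cases l <;> simp [PySem.Chars.splitOnMax.go]

lemma pv_goMax (o : List Char) : ∀ (fuel : Nat) (cur t : List Char) (acc : List (List Char)),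
    ' ' ∉ o → o.length + 2 ≤ fuel →
    PySem.Chars.splitOnMax.go [' '] fuel 1 (o ++ ' ' :: t) cur acc
      = acc.reverse ++ [cur.reverse ++ o, t] := by
  induction o with
  | nil =>
    intro fuel cur t acc _ hf
    cases fuel with
    | zero => omega
    | succ f =>
      simp only [List.nil_append]
      have hstep : PySem.Chars.splitOnMax.go [' '] (f + 1) 1 (' ' :: t) cur acc
          = PySem.Chars.splitOnMax.go [' '] f 0 t [] (cur.reverse :: acc) := by
        simp [PySem.Chars.splitOnMax.go, List.isPrefixOf]
      rw [hstep, pv_goMax_m0]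
      simp
  | cons c o' ih =>
    intro fuel cur t acc h hf
    cases fuel with
    | zero => omega
    | succ f =>
      have hc : (' ' == c) = false := by
        simp only [beq_eq_false_iff_ne, ne_eq]
        intro e; exact h (List.mem_cons.mpr (Or.inl e))
      have hstep : PySem.Chars.splitOnMax.go [' '] (f + 1) 1 ((c :: o') ++ ' ' :: t) cur acc
          = PySem.Chars.splitOnMax.go [' '] f 1 (o' ++ ' ' :: t) (c :: cur) acc := by
        simp [PySem.Chars.splitOnMax.go, List.isPrefixOf, hc]
      rw [hstep, ih f (c :: cur) t acc (fun hm => h (List.mem_cons_of_mem c hm)) (by simp at hf ⊢; omega)]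
      simp

lemma pv_splitOnMax1 (o t : List Char) (h : ' ' ∉ o) :
    PySem.Chars.splitOnMax (o ++ ' ' :: t) [' '] 1 = [o, t] := by
  have h1 : ¬ ((1 : Int) < 0) := by norm_num
  rw [PySem.Chars.splitOnMax, if_neg h1, show Int.toNat 1 = 1 from rfl]
  rw [pv_goMax o ((o ++ ' ' :: t).length + 1) [] t [] h (by simp [List.length_append])]
  simp

lemma pv_join_flat (c : List Char) (cs : List (List Char)) :
    PySem.Chars.join [' '] (c :: cs) = c ++ cs.flatMap (fun r => ' ' :: r) := by
  induction cs generalizing c with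
  | nil => simp [PySem.Chars.join_singleton]
  | cons d cs ih =>
    rw [PySem.Chars.join_cons_cons, ih d]
    simp

lemma pv_flat_map (rest : List (Int × String)) :
    List.map String.ofList (List.flatMap PySem.Chars.split₀ (List.map (fun x => x.2.toList) rest)) =
    List.flatMap (fun p => List.map String.ofList (PySem.Chars.split₀ p.2.toList)) rest := by
  induction rest with
  | nil => simp
  | cons a l ih => simp [ih]

-- both tails compute the same token list from the sorted pair list
lemma pv_tail_eq (p0 : Int × String) (rest : List (Int × String))
    (h0 : ∃ o t, o ∈ pvOps ∧ p0.2 = o ++ " " ++ t) :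
    PySem.Str.split₀
      ((PySem.List.pyGet? ((PySem.Str.splitMax? (PySem.Str.join " " ((p0 :: rest).map (·.2))) " " 1).getD []) 1).getD "")
    = rest.foldl (fun out p => out ++ PySem.Str.split₀ p.2)
        (PySem.Str.split₀
          ((PySem.List.pyGet? ((PySem.Str.splitMax? p0.2 " " 1).getD []) 1).getD "")) := by
  obtain ⟨o, t, ho, hp⟩ := h0
  have hosp : ' ' ∉ o.toList := by
    rcases (by simpa [pvOps] using ho : o = "<and>" ∨ o = "<or>" ∨ o = "<not>") with rfl | rfl | rfl <;> decide
  have hts : p0.2.toList = o.toList ++ ' ' :: t.toList := by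
    rw [hp]; simp
  have hget : ∀ (a b : String), PySem.List.pyGet? [a, b] 1 = some b := by
    intro a b; rfl
  have hjoin : (PySem.Str.join " " ((p0 :: rest).map (·.2))).toList
      = o.toList ++ ' ' :: (t.toList ++ (rest.map (·.2.toList)).flatMap (fun r => ' ' :: r)) := by
    rw [PySem.Str.join]
    simp only [List.map_cons, List.map_map]
    rw [show (" " : String).toList = [' '] from rfl, Function.comp_def]
    rw [pv_join_flat]
    simp [hts]
  rw [PySem.List.foldl_append_eq_flatMap]
  have hsplitJ : PySem.Str.splitMax? (PySem.Str.join " " ((p0 :: rest).map (·.2))) " " 1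
      = some [String.ofList o.toList,
              String.ofList (t.toList ++ (rest.map (·.2.toList)).flatMap (fun r => ' ' :: r))] := by
    rw [PySem.Str.splitMax?]
    rw [show (" " : String).toList = [' '] from rfl, hjoin]
    rw [PySem.Chars.splitMax?]
    rw [pv_splitOnMax1 _ _ hosp]
    simp
  have hsplit0 : PySem.Str.splitMax? p0.2 " " 1 = some [String.ofList o.toList, String.ofList t.toList] := by
    rw [PySem.Str.splitMax?]
    rw [show (" " : String).toList = [' '] from rfl, hts]
    rw [PySem.Chars.splitMax?]
    rw [pv_splitOnMax1 _ _ hosp]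
    simp
  rw [hsplitJ, hsplit0]
  simp only [Option.getD_some, hget]
  simp [PySem.Str.split₀, pv_split₀_flat]
  exact pv_flat_map rest

-- ===== VERDICT (by name: the statement is the Claim_ definition above) =====
theorem sort_query_spec : Claim_equal_sort_query := by
  intro query default_op _hdom hpre
  obtain ⟨hd, x, hxq, hx1, hx2, hx3⟩ := hpre
  unfold Spec_sort_query sort_query sort_query_alt
  rw [pv_loopA default_op query default_op [], pv_loopB default_op query default_op []]
  rw [pv_heap_eq_sorted]
  simp only [List.nil_append]
  have hdops : default_op ∈ pvOps := by simp [pvOps]; tauto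
  have hne : pvPairs default_op query default_op ≠ [] := by
    apply pv_pairs_ne
    exact ⟨x, hxq, by rw [pv_contains_iff]; simp [pvOps]; tauto⟩
  have hperm := PySem.List.sorted2_perm (pvPairs default_op query default_op)
      (·.1) (·.2.toList) false
  cases hL : PySem.List.sorted2 (pvPairs default_op query default_op) (·.1) (·.2.toList) false with
  | nil =>
    rw [hL] at hperm
    exact absurd (List.Perm.nil_eq hperm).symm hne
  | cons p0 rest =>
    apply pv_tail_eq
    have hmem : p0 ∈ pvPairs default_op query default_op := by
      rw [hL] at hperm; exact hperm.mem_iff.mp (by simp)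
    exact pv_pairs_shape default_op hdops query default_op hdops p0 hmem
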